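-- pv_equiv track=rewrite | github.com/jadwiga22/wmiuwr | Python/l02/z03.py | calcDist
-- ===== SOURCE A (Python) =====
-- def calcDist(occ, occLang):
--     res = 0
--     for a in occ:
--         if a in occLang:
--             res += abs(occ[a] - occLang[a])
--         else:
--             res += occ[a]
--
--     for a in occLang:
--         if a not in occ:
--             res += abs(occLang[a])
--
--     return res
-- ===== SOURCE B (Python) =====
-- def calcDist(occ, occLang):
--     ks1 = sorted(occ)
--     ks2 = sorted(occLang)
--     i = j = 0
--     res = 0
--     while i < len(ks1) and j < len(ks2):
--         if ks1[i] == ks2[j]: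
--             res += abs(occ[ks1[i]] - occLang[ks2[j]])
--             i += 1
--             j += 1
--         elif ks1[i] < ks2[j]:
--             res += occ[ks1[i]]
--             i += 1
--         else:
--             res += abs(occLang[ks2[j]])
--             j += 1
--     while i < len(ks1):
--         res += occ[ks1[i]]
--         i += 1
--     while j < len(ks2):
--         res += abs(occLang[ks2[j]])
--         j += 1
--     return res
-- ===== Notes on version B (the rewrite author's own statement) =====
-- stated objective: alternative
-- what changed: Replaces A's two hash-membership-tested loops with sort-then-merge: both key lists are sorted and a single two-pointer merge walks them in order, adding |occ-occLang| on equal keys, raw occ value when the occ key is smaller, and abs(occLang) when the occLang key is smaller.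
import Mathlib
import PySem

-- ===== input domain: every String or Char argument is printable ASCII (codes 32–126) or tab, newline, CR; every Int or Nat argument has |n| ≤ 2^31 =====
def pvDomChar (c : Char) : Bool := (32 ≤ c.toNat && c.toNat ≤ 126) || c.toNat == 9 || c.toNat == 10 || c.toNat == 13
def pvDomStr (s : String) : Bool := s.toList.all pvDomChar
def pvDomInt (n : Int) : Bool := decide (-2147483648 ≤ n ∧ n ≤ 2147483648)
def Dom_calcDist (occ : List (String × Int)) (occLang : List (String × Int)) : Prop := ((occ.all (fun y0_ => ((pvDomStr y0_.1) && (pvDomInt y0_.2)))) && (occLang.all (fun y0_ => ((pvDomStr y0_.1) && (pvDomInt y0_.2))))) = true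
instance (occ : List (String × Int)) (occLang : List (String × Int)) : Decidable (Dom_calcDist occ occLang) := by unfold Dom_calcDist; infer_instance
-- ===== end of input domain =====

-- B replaces A's two membership-tested hash loops with sort-then-merge: sorted key lists walked by one two-pointer merge (alternative algorithm, O((n+m)log) vs O(n+m)).

-- ===== PORT A =====
def calcDist (occ : List (String × Int)) (occLang : List (String × Int)) : Int :=
  let d1 := PySem.Dict.ofList occ
  let d2 := PySem.Dict.ofList occLang
  let res : Int := 0
  let res := d1.keys.foldl (fun res a =>
    if d2.contains a then res + |d1.getD a 0 - d2.getD a 0|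
    else res + d1.getD a 0) res
  let res := d2.keys.foldl (fun res a =>
    if !(d1.contains a) then res + |d2.getD a 0| else res) res
  res

-- ===== PORT B =====
-- B's while loops walk the two sorted key lists by advancing indices; ported as the
-- obvious structural recursion on the remaining suffixes (same state: res and positions).
def calcDistMerge (d1 d2 : PySem.Dict String Int) :
    List String → List String → Int → Int
  | [], [], res => res
  | [], y :: ys, res => calcDistMerge d1 d2 [] ys (res + |d2.getD y 0|)
  | x :: xs, [], res => calcDistMerge d1 d2 xs [] (res + d1.getD x 0)
  | x :: xs, y :: ys, res =>
      if x = y then calcDistMerge d1 d2 xs ys (res + |d1.getD x 0 - d2.getD y 0|)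
      else if x < y then calcDistMerge d1 d2 xs (y :: ys) (res + d1.getD x 0)
      else calcDistMerge d1 d2 (x :: xs) ys (res + |d2.getD y 0|)
  termination_by l1 l2 _ => l1.length + l2.length

def calcDist_alt (occ : List (String × Int)) (occLang : List (String × Int)) : Int :=
  let d1 := PySem.Dict.ofList occ
  let d2 := PySem.Dict.ofList occLang
  let ks1 := PySem.List.sorted d1.keys (fun x => x) false
  let ks2 := PySem.List.sorted d2.keys (fun x => x) false
  calcDistMerge d1 d2 ks1 ks2 0

-- ===== PRECONDITION & SPEC =====
def Spec_calcDist (occ : List (String × Int)) (occLang : List (String × Int)) (out : Int) : Prop := out = calcDist_alt occ occLang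
instance (occ : List (String × Int)) (occLang : List (String × Int)) (out : Int) : Decidable (Spec_calcDist occ occLang out) := by unfold Spec_calcDist; infer_instance

-- ===== CLAIM (what is proved, stated in full; the proofs are below) =====
def Claim_equal_calcDist : Prop := ∀ (occ : List (String × Int)) (occLang : List (String × Int)), Dom_calcDist occ occLang → Spec_calcDist occ occLang (calcDist occ occLang)

-- ===== LEMMAS AND PROOFS =====

-- A's first loop: accumulate f on keys passing p, g on the rest.
theorem foldl_if_add {α : Type} (p : α → Bool) (f g : α → Int) (l : List α) (init : Int) :
    l.foldl (fun r a => if p a then r + f a else r + g a) init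
      = init + ((l.filter p).map f).sum + ((l.filter (fun a => !p a)).map g).sum := by
  induction l generalizing init with
  | nil => simp
  | cons x xs ih =>
    by_cases h : p x = true <;> (simp [List.foldl_cons, h, ih]; try ring)

-- A's second loop: accumulate f only on keys passing p.
theorem foldl_if_add' {α : Type} (p : α → Bool) (f : α → Int) (l : List α) (init : Int) :
    l.foldl (fun r a => if p a then r + f a else r) init
      = init + ((l.filter p).map f).sum := by
  induction l generalizing init with
  | nil => simp
  | cons x xs ih =>
    by_cases h : p x = true <;> (simp [List.foldl_cons, h, ih]; try ring)

-- Two duplicate-free lists with the same members have equal mapped sums.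
theorem sum_map_eq_of_same_mem {α : Type} [DecidableEq α] (f : α → Int) (l₁ l₂ : List α)
    (h₁ : l₁.Nodup) (h₂ : l₂.Nodup) (h : ∀ x, x ∈ l₁ ↔ x ∈ l₂) :
    (l₁.map f).sum = (l₂.map f).sum := by
  exact (List.Perm.map f ((List.perm_ext_iff_of_nodup h₁ h₂).mpr h)).sum_eq

-- The two-pointer merge over strictly increasing key lists computes the
-- three region sums (filters by membership in the other list).
theorem calcDistMerge_eq (d1 d2 : PySem.Dict String Int) (l1 l2 : List String)
    (h1 : l1.Pairwise (· < ·)) (h2 : l2.Pairwise (· < ·)) (res : Int) :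
    calcDistMerge d1 d2 l1 l2 res
      = res + ((l1.filter (fun a => l2.contains a)).map (fun a => |d1.getD a 0 - d2.getD a 0|)).sum
            + ((l1.filter (fun a => !l2.contains a)).map (fun a => d1.getD a 0)).sum
            + ((l2.filter (fun a => !l1.contains a)).map (fun a => |d2.getD a 0|)).sum := by
  induction l1, l2, res using calcDistMerge.induct d1 d2 with
  | case1 res => simp [calcDistMerge]
  | case2 y ys res ih =>
    rw [calcDistMerge, ih List.Pairwise.nil (List.pairwise_cons.mp h2).2]
    simp
    ring
  | case3 x xs res ih =>
    rw [calcDistMerge, ih (List.pairwise_cons.mp h1).2 List.Pairwise.nil]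
    simp
    ring
  | case4 xs y ys res ih =>
    have hx : ∀ z ∈ xs, y < z := (List.pairwise_cons.mp h1).1
    have hy : ∀ z ∈ ys, y < z := (List.pairwise_cons.mp h2).1
    rw [calcDistMerge, if_pos rfl, ih (List.pairwise_cons.mp h1).2 (List.pairwise_cons.mp h2).2]
    have t1 : (y :: xs).filter (fun a => (y :: ys).contains a)
        = y :: xs.filter (fun a => ys.contains a) := by
      rw [List.filter_cons_of_pos (by simp)]
      congr 1
      apply List.filter_congr; intro z hz
      have : z ≠ y := ne_of_gt (hx z hz)
      simp [this]
    have t2 : (y :: xs).filter (fun a => !(y :: ys).contains a)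
        = xs.filter (fun a => !ys.contains a) := by
      rw [List.filter_cons_of_neg (by simp)]
      apply List.filter_congr; intro z hz
      have : z ≠ y := ne_of_gt (hx z hz)
      simp [this]
    have t3 : (y :: ys).filter (fun a => !(y :: xs).contains a)
        = ys.filter (fun a => !xs.contains a) := by
      rw [List.filter_cons_of_neg (by simp)]
      apply List.filter_congr; intro z hz
      have : z ≠ y := ne_of_gt (hy z hz)
      simp [this]
    rw [t1, t2, t3, List.map_cons, List.sum_cons]
    ring
  | case5 x xs y ys res hne hlt ih =>
    have hy : ∀ z ∈ ys, y < z := (List.pairwise_cons.mp h2).1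
    have hnotin : ¬ (x ∈ y :: ys) := by
      intro hmem
      rcases List.mem_cons.mp hmem with h | h
      · exact hne h
      · exact absurd hlt (not_lt.mpr (le_of_lt (hy x h)))
    rw [calcDistMerge, if_neg hne, if_pos hlt, ih (List.pairwise_cons.mp h1).2 h2]
    have t1 : (x :: xs).filter (fun a => (y :: ys).contains a)
        = xs.filter (fun a => (y :: ys).contains a) := by
      rw [List.filter_cons_of_neg (by simpa using hnotin)]
    have t2 : (x :: xs).filter (fun a => !(y :: ys).contains a)
        = x :: xs.filter (fun a => !(y :: ys).contains a) := by
      rw [List.filter_cons_of_pos (by simpa using hnotin)]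
    have t3 : (y :: ys).filter (fun a => !(x :: xs).contains a)
        = (y :: ys).filter (fun a => !xs.contains a) := by
      apply List.filter_congr; intro z hz
      have hzx : z ≠ x := by
        rcases List.mem_cons.mp hz with h | h
        · subst h; exact ne_of_gt hlt
        · exact ne_of_gt (lt_trans hlt (hy z h))
      simp [hzx]
    rw [t1, t2, t3, List.map_cons, List.sum_cons]
    ring
  | case6 x xs y ys res hne hnlt ih =>
    have hx : ∀ z ∈ xs, x < z := (List.pairwise_cons.mp h1).1
    have hygt : y < x := lt_of_le_of_ne (not_lt.mp hnlt) (fun h => hne h.symm)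
    have hnotin : ¬ (y ∈ x :: xs) := by
      intro hmem
      rcases List.mem_cons.mp hmem with h | h
      · exact hne h.symm
      · exact absurd hygt (not_lt.mpr (le_of_lt (hx y h)))
    rw [calcDistMerge, if_neg hne, if_neg hnlt, ih h1 (List.pairwise_cons.mp h2).2]
    have hzy : ∀ z ∈ x :: xs, z ≠ y := by
      intro z hz
      rcases List.mem_cons.mp hz with h | h
      · subst h; exact ne_of_gt hygt
      · exact ne_of_gt (lt_trans hygt (hx z h))
    have t1 : (x :: xs).filter (fun a => (y :: ys).contains a)
        = (x :: xs).filter (fun a => ys.contains a) := by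
      apply List.filter_congr; intro z hz
      simp [hzy z hz]
    have t2 : (x :: xs).filter (fun a => !(y :: ys).contains a)
        = (x :: xs).filter (fun a => !ys.contains a) := by
      apply List.filter_congr; intro z hz
      simp [hzy z hz]
    have t3 : (y :: ys).filter (fun a => !(x :: xs).contains a)
        = y :: ys.filter (fun a => !(x :: xs).contains a) := by
      rw [List.filter_cons_of_pos (by simpa using hnotin)]
    rw [t1, t2, t3, List.map_cons, List.sum_cons]
    ring

-- ===== VERDICT (by name: the statement is the Claim_ definition above) =====
theorem calcDist_spec : Claim_equal_calcDist := by
  intro occ occLang _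
  simp only [Spec_calcDist, calcDist, calcDist_alt]
  set d1 := PySem.Dict.ofList occ with hd1
  set d2 := PySem.Dict.ofList occLang with hd2
  have hn1 : d1.keys.Nodup := PySem.Dict.nodup_keys_ofList occ
  have hn2 : d2.keys.Nodup := PySem.Dict.nodup_keys_ofList occLang
  have hperm1 : (PySem.List.sorted d1.keys (fun x => x) false).Perm d1.keys :=
    PySem.List.sorted_perm _ _ _
  have hperm2 : (PySem.List.sorted d2.keys (fun x => x) false).Perm d2.keys :=
    PySem.List.sorted_perm _ _ _
  have hsn1 : (PySem.List.sorted d1.keys (fun x => x) false).Nodup := hperm1.nodup_iff.mpr hn1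
  have hsn2 : (PySem.List.sorted d2.keys (fun x => x) false).Nodup := hperm2.nodup_iff.mpr hn2
  have hp1 : (PySem.List.sorted d1.keys (fun x => x) false).Pairwise (· < ·) := by
    have hle := PySem.List.sorted_pairwise d1.keys (fun x => x)
    exact (hle.and (List.nodup_iff_pairwise_ne.mp hsn1)).imp
      (fun h => lt_of_le_of_ne h.1 h.2)
  have hp2 : (PySem.List.sorted d2.keys (fun x => x) false).Pairwise (· < ·) := by
    have hle := PySem.List.sorted_pairwise d2.keys (fun x => x)
    exact (hle.and (List.nodup_iff_pairwise_ne.mp hsn2)).imp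
      (fun h => lt_of_le_of_ne h.1 h.2)
  rw [foldl_if_add' (fun a => !(d1.contains a)) (fun a => |d2.getD a 0|),
      foldl_if_add (fun a => d2.contains a),
      calcDistMerge_eq d1 d2 _ _ hp1 hp2]
  have hboth :
      (((PySem.List.sorted d1.keys (fun x => x) false).filter
          (fun a => (PySem.List.sorted d2.keys (fun x => x) false).contains a)).map
        (fun a => |d1.getD a 0 - d2.getD a 0|)).sum
      = ((d1.keys.filter (fun a => d2.contains a)).map
        (fun a => |d1.getD a 0 - d2.getD a 0|)).sum := by
    apply sum_map_eq_of_same_mem _ _ _ (List.Nodup.filter _ hsn1) (List.Nodup.filter _ hn1)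
    intro z
    simp [List.mem_filter, hperm1.mem_iff, hperm2.mem_iff,
      PySem.Dict.contains_iff_mem_keys]
  have honly1 :
      (((PySem.List.sorted d1.keys (fun x => x) false).filter
          (fun a => !(PySem.List.sorted d2.keys (fun x => x) false).contains a)).map
        (fun a => d1.getD a 0)).sum
      = ((d1.keys.filter (fun a => !(d2.contains a))).map (fun a => d1.getD a 0)).sum := by
    apply sum_map_eq_of_same_mem _ _ _ (List.Nodup.filter _ hsn1) (List.Nodup.filter _ hn1)
    intro z
    simp [List.mem_filter, hperm1.mem_iff, hperm2.mem_iff,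
      ← PySem.Dict.contains_iff_mem_keys]
  have honly2 :
      (((PySem.List.sorted d2.keys (fun x => x) false).filter
          (fun a => !(PySem.List.sorted d1.keys (fun x => x) false).contains a)).map
        (fun a => |d2.getD a 0|)).sum
      = ((d2.keys.filter (fun a => !(d1.contains a))).map (fun a => |d2.getD a 0|)).sum := by
    apply sum_map_eq_of_same_mem _ _ _ (List.Nodup.filter _ hsn2) (List.Nodup.filter _ hn2)
    intro z
    simp [List.mem_filter, hperm1.mem_iff, hperm2.mem_iff,
      ← PySem.Dict.contains_iff_mem_keys]
  rw [hboth, honly1, honly2]
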